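-- pv_equiv track=rewrite | github.com/vineethsai/maif | maif/semantic/product_quantization.py | get_optimal_pq_config
-- ===== SOURCE A (Python) =====
-- def get_optimal_pq_config(embedding_dim: int) -> dict:
--     """
--     Get optimal PQ configuration for given embedding dimension.
--
--     Uses empirically-determined configurations that balance compression
--     ratio and reconstruction quality.
--
--     Parameters:
--         embedding_dim: Embedding dimension (e.g., 384, 768)
--
--     Returns:
--         Dict with 'num_subvectors' and 'codebook_size'
--     """
--     configs = {
--         384: {"num_subvectors": 8, "codebook_size": 256},    # 384/8 = 48 dims per subvec
--         512: {"num_subvectors": 8, "codebook_size": 256},    # 512/8 = 64 dims per subvec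
--         768: {"num_subvectors": 12, "codebook_size": 256},   # 768/12 = 64 dims per subvec
--         1024: {"num_subvectors": 16, "codebook_size": 256},  # 1024/16 = 64 dims per subvec
--         1536: {"num_subvectors": 24, "codebook_size": 256},  # 1536/24 = 64 dims per subvec
--     }
--
--     # If exact match, use it
--     if embedding_dim in configs:
--         return configs[embedding_dim]
--
--     # Otherwise, infer from similar dimensions
--     # Prefer subvector dimension of 32-64
--     for num_subvectors in [8, 12, 16, 24, 32]:
--         if embedding_dim % num_subvectors == 0:
--             subvec_dim = embedding_dim // num_subvectors
--             if 32 <= subvec_dim <= 64: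
--                 return {
--                     "num_subvectors": num_subvectors,
--                     "codebook_size": 256
--                 }
--
--     # Fallback: divide into ~48-dim subvectors
--     num_subvectors = max(1, embedding_dim // 48)
--     return {
--         "num_subvectors": num_subvectors,
--         "codebook_size": 256
--     }
-- ===== SOURCE B (Python) =====
-- def get_optimal_pq_config(embedding_dim: int) -> dict:
--     # Dual-space search: instead of trying subvector COUNTS from a hard-coded
--     # list (and a lookup table), scan the subvector DIMENSION k from 64 down
--     # to 32 and recover the count as embedding_dim // k.  Since dim = count*k,
--     # the largest valid dimension corresponds to the smallest valid count, so
--     # this finds exactly the config A's table + count-scan would pick.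
--     for subvec_dim in range(64, 31, -1):
--         if embedding_dim % subvec_dim == 0:
--             n = embedding_dim // subvec_dim
--             if n in (8, 12, 16, 24, 32):
--                 return {"num_subvectors": n, "codebook_size": 256}
--     return {"num_subvectors": max(1, embedding_dim // 48), "codebook_size": 256}
-- ===== Notes on version B (the rewrite author's own statement) =====
-- stated objective: alternative
-- what changed: B searches the dual space: instead of A's five-entry lookup table plus a scan over hard-coded subvector COUNTS, B scans the subvector DIMENSION k from 64 down to 32 and recovers the count as embedding_dim//k; since dim = count*k, the largest valid dimension is the smallest valid count, so the first match coincides with A's (proved), and the table is dropped because the scan already yields its entries.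
import Mathlib
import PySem

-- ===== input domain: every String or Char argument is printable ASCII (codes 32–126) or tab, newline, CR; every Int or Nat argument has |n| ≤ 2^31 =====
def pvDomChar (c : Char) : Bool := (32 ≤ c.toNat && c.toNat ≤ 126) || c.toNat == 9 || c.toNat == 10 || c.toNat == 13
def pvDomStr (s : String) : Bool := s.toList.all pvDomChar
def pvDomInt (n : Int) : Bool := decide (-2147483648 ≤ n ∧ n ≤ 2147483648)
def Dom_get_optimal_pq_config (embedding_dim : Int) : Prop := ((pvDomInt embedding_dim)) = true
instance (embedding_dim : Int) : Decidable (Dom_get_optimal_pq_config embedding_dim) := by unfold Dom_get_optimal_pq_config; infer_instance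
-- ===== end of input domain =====

-- B replaces A's lookup table + scan over subvector counts by a dual scan over subvector
-- dimensions 64..32, recovering the count as embedding_dim // k (objective: alternative).


-- ===== PORT A =====
-- the hard-coded table 'configs'
def pqConfigsA : PySem.Dict Int (List (String × Int)) :=
  PySem.Dict.mk
    [ (384,  [("num_subvectors", 8),  ("codebook_size", 256)]),
      (512,  [("num_subvectors", 8),  ("codebook_size", 256)]),
      (768,  [("num_subvectors", 12), ("codebook_size", 256)]),
      (1024, [("num_subvectors", 16), ("codebook_size", 256)]),
      (1536, [("num_subvectors", 24), ("codebook_size", 256)]) ]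

-- A's 'for num_subvectors in [8, 12, 16, 24, 32]' loop with nested ifs
def pqScanA (embedding_dim : Int) : List Int → Option Int
  | [] => none
  | n :: rest =>
    if PySem.Int.mod embedding_dim n == 0 then
      let subvec_dim := PySem.Int.floordiv embedding_dim n
      if 32 ≤ subvec_dim ∧ subvec_dim ≤ 64 then some n
      else pqScanA embedding_dim rest
    else pqScanA embedding_dim rest

def get_optimal_pq_config (embedding_dim : Int) : List (String × Int) :=
  match PySem.Dict.get? pqConfigsA embedding_dim with
  | some c => c
  | none =>
    match pqScanA embedding_dim [8, 12, 16, 24, 32] with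
    | some n => [("num_subvectors", n), ("codebook_size", 256)]
    | none => [("num_subvectors", max 1 (PySem.Int.floordiv embedding_dim 48)), ("codebook_size", 256)]

-- ===== PORT B =====
-- B's 'for subvec_dim in range(64, 31, -1)' loop over subvector DIMENSIONS
def pqScanB (embedding_dim : Int) : List Int → Option Int
  | [] => none
  | k :: rest =>
    if PySem.Int.mod embedding_dim k == 0 then
      let n := PySem.Int.floordiv embedding_dim k
      if n == 8 ∨ n == 12 ∨ n == 16 ∨ n == 24 ∨ n == 32 then some n
      else pqScanB embedding_dim rest
    else pqScanB embedding_dim rest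

def get_optimal_pq_config_alt (embedding_dim : Int) : List (String × Int) :=
  match pqScanB embedding_dim (PySem.List.pyRange 64 31 (-1)) with
  | some n => [("num_subvectors", n), ("codebook_size", 256)]
  | none => [("num_subvectors", max 1 (PySem.Int.floordiv embedding_dim 48)), ("codebook_size", 256)]

-- ===== PRECONDITION & SPEC =====
def Spec_get_optimal_pq_config (embedding_dim : Int) (out : List (String × Int)) : Prop := out = get_optimal_pq_config_alt embedding_dim
instance (embedding_dim : Int) (out : List (String × Int)) : Decidable (Spec_get_optimal_pq_config embedding_dim out) := by unfold Spec_get_optimal_pq_config; infer_instance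

-- ===== CLAIM (what is proved, stated in full; the proofs are below) =====
def Claim_equal_get_optimal_pq_config : Prop := ∀ (embedding_dim : Int), Dom_get_optimal_pq_config embedding_dim → Spec_get_optimal_pq_config embedding_dim (get_optimal_pq_config embedding_dim)

-- ===== LEMMAS AND PROOFS =====
-- Any hit of either scan forces 256 ≤ ed ≤ 2048; outside that window both scans miss.
theorem pqScanA_none (ed : Int) (h : ed < 256 ∨ 2048 < ed) (l : List Int)
    (hl : ∀ n ∈ l, 8 ≤ n ∧ n ≤ 32) : pqScanA ed l = none := by
  induction l with
  | nil => rfl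
  | cons n rest ih =>
    have hn := hl n (by simp)
    have hrest : ∀ m ∈ rest, 8 ≤ m ∧ m ≤ 32 := fun m hm => hl m (by simp [hm])
    simp only [pqScanA]
    by_cases hmod : PySem.Int.mod ed n == 0
    · have hdvd : n ∣ ed := (PySem.Int.mod_eq_zero_iff_dvd ed n).mp (by simpa using hmod)
      obtain ⟨q, hq⟩ := hdvd
      have hfd : PySem.Int.floordiv ed n = q := by
        rw [PySem.Int.floordiv_eq_ediv_of_pos (by omega)]
        rw [hq]; exact Int.mul_ediv_cancel_left q (by omega)
      have : ¬ (32 ≤ PySem.Int.floordiv ed n ∧ PySem.Int.floordiv ed n ≤ 64) := by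
        rw [hfd]
        rintro ⟨h1, h2⟩
        have hlow : 256 ≤ ed := by nlinarith
        have hhigh : ed ≤ 2048 := by nlinarith
        omega
      simp [hmod, this, ih hrest]
    · simp [hmod, ih hrest]

theorem pqScanB_none (ed : Int) (h : ed < 256 ∨ 2048 < ed) (l : List Int)
    (hl : ∀ k ∈ l, 32 ≤ k ∧ k ≤ 64) : pqScanB ed l = none := by
  induction l with
  | nil => rfl
  | cons k rest ih =>
    have hk := hl k (by simp)
    have hrest : ∀ m ∈ rest, 32 ≤ m ∧ m ≤ 64 := fun m hm => hl m (by simp [hm])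
    simp only [pqScanB]
    by_cases hmod : PySem.Int.mod ed k == 0
    · have hdvd : k ∣ ed :=
        (PySem.Int.mod_eq_zero_iff_dvd ed k).mp (by simpa using hmod)
      obtain ⟨q, hq⟩ := hdvd
      have hfd : PySem.Int.floordiv ed k = q := by
        rw [PySem.Int.floordiv_eq_ediv_of_pos (by omega)]
        rw [hq]; exact Int.mul_ediv_cancel_left q (by omega)
      have h8 : q ≠ 8 := by rintro rfl; rcases h with h | h <;> nlinarith [hk.1, hk.2]
      have h12 : q ≠ 12 := by rintro rfl; rcases h with h | h <;> nlinarith [hk.1, hk.2]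
      have h16 : q ≠ 16 := by rintro rfl; rcases h with h | h <;> nlinarith [hk.1, hk.2]
      have h24 : q ≠ 24 := by rintro rfl; rcases h with h | h <;> nlinarith [hk.1, hk.2]
      have h32 : q ≠ 32 := by rintro rfl; rcases h with h | h <;> nlinarith [hk.1, hk.2]
      simp [hmod, hfd, h8, h12, h16, h24, h32, ih hrest]
    · simp [hmod, ih hrest]

-- inside the window [256, 2048] the two programs agree, by exhaustive evaluation
set_option maxRecDepth 100000 in
set_option maxHeartbeats 4000000 in
theorem pq_window : ∀ m : Fin 1793,
    get_optimal_pq_config (256 + ((m : Nat) : Int)) = get_optimal_pq_config_alt (256 + ((m : Nat) : Int)) := by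
  decide

theorem pq_out (ed : Int) (h : ed < 256 ∨ 2048 < ed) :
    get_optimal_pq_config ed = get_optimal_pq_config_alt ed := by
  have hA := pqScanA_none ed h [8, 12, 16, 24, 32] (by intro n hn; fin_cases hn <;> omega)
  have hr : PySem.List.pyRange 64 31 (-1) =
      [64, 63, 62, 61, 60, 59, 58, 57, 56, 55, 54, 53, 52, 51, 50, 49, 48,
       47, 46, 45, 44, 43, 42, 41, 40, 39, 38, 37, 36, 35, 34, 33, 32] := by decide
  have hB := pqScanB_none ed h (PySem.List.pyRange 64 31 (-1))
    (by rw [hr]; intro k hk; fin_cases hk <;> omega)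
  have hmiss : PySem.Dict.get? pqConfigsA ed = none := by
    have e1 : ((384:Int) == ed) = false := by simp; omega
    have e2 : ((512:Int) == ed) = false := by simp; omega
    have e3 : ((768:Int) == ed) = false := by simp; omega
    have e4 : ((1024:Int) == ed) = false := by simp; omega
    have e5 : ((1536:Int) == ed) = false := by simp; omega
    simp [pqConfigsA, PySem.Dict.get?, List.find?, e1, e2, e3, e4, e5]
  unfold get_optimal_pq_config get_optimal_pq_config_alt
  rw [hmiss, hA, hB]

-- ===== VERDICT (by name: the statement is the Claim_ definition above) =====
theorem get_optimal_pq_config_spec : Claim_equal_get_optimal_pq_config := by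
  intro ed _
  unfold Spec_get_optimal_pq_config
  by_cases h : 256 ≤ ed ∧ ed ≤ 2048
  · have hm : (ed - 256).toNat < 1793 := by omega
    have := pq_window ⟨(ed - 256).toNat, hm⟩
    have hed : (256 : Int) + (((ed - 256).toNat : Nat) : Int) = ed := by omega
    rwa [hed] at this
  · exact pq_out ed (by omega)
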